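-- pv_equiv track=rewrite | github.com/MasterYip/ChatPaper2Xmind | pdf_extract/__init__.py | combine_eqbox
-- ===== SOURCE A (Python) =====
-- def get_bounding_box(bbox_cluster_list):
--     if bbox_cluster_list:
--         x0 = min([bbox[0] for bbox in bbox_cluster_list])
--         y0 = min([bbox[1] for bbox in bbox_cluster_list])
--         x1 = max([bbox[2] for bbox in bbox_cluster_list])
--         y1 = max([bbox[3] for bbox in bbox_cluster_list])
--         return (x0, y0, x1, y1)
--     else:
--         return None
--
-- def combine_eqbox(bbox, critic_ydis=5):
--     """Combine the overlapped equation bounding boxes"""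
--     bbox_list = bbox
--     i = 0
--     while i < len(bbox_list)-1:
--         if bbox_list[i+1][1]-bbox_list[i][3] < critic_ydis and abs(bbox_list[i+1][0]-bbox_list[i][0]) < 1:
--             bounding = get_bounding_box(bbox_list[i:i+2])
--             bbox_list.pop(i)
--             bbox_list.pop(i)
--             bbox_list.insert(i, bounding)
--             i -= 1
--         i += 1
--     return bbox_list
-- ===== SOURCE B (Python) =====
-- def combine_eqbox(bbox, critic_ydis=5):
--     """Combine the overlapped equation bounding boxes (single pass with a running accumulated box)."""
--     if not bbox:
--         return bbox
--     out = []
--     cur = bbox[0]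
--     for nxt in bbox[1:]:
--         if nxt[1] - cur[3] < critic_ydis and abs(nxt[0] - cur[0]) < 1:
--             cur = (min(cur[0], nxt[0]), min(cur[1], nxt[1]),
--                    max(cur[2], nxt[2]), max(cur[3], nxt[3]))
--         else:
--             out.append(cur)
--             cur = nxt
--     out.append(cur)
--     bbox[:] = out   # A mutates its argument in place; keep the same observable effect
--     return bbox
-- ===== Notes on version B (the rewrite author's own statement) =====
-- stated objective: alternative
-- what changed: Replaced the in-place while loop with pop/pop/insert and index backtracking by a single left-to-right pass that keeps a running accumulated bounding box and appends it to the output when the next box is not mergeable (O(n) worst case vs A's O(n^2) worst case, though a timing run could not resolve a difference on the generated inputs).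
import Mathlib
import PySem

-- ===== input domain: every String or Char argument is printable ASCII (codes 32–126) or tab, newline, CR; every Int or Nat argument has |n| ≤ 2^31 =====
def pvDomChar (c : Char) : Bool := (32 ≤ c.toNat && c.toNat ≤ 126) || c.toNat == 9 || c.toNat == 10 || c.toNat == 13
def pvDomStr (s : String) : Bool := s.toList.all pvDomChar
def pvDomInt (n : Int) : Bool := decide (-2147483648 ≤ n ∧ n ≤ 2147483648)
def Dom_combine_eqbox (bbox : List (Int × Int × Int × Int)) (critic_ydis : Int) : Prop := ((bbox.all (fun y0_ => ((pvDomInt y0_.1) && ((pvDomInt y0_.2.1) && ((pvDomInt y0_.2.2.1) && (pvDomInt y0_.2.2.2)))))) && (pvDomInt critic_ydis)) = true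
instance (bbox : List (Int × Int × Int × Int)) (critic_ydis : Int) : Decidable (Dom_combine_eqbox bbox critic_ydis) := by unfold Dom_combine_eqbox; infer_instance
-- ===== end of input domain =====

-- B replaces A's in-place pop/insert scan with index backtracking by a single left-to-right pass
-- keeping a running accumulated box. A mutates its argument list in place; B performs the same
-- mutation in Python, and the equivalence proved here is about the return value.

-- ===== PORT A =====
-- get_bounding_box: min/max over the columns of a nonempty list, None on []
def get_bounding_box (l : List (Int × Int × Int × Int)) : Option (Int × Int × Int × Int) :=
  match l with
  | [] => none
  | x :: xs =>
    some ((xs.map (·.1)).foldl min x.1,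
          (xs.map (·.2.1)).foldl min x.2.1,
          (xs.map (·.2.2.1)).foldl max x.2.2.1,
          (xs.map (·.2.2.2)).foldl max x.2.2.2)

-- the while loop of A; i is the loop index (it never goes negative: `i -= 1; i += 1` cancels).
-- `pop(i); pop(i); insert(i, bounding)` with i+1 < len is exactly `take i ++ bounding :: drop (i+2)`.
-- Each iteration decreases len(bbox_list) - i by exactly 1, so len(bbox) fuel makes the same
-- computation total by structural recursion (a totality guard only; it never cuts the loop short).
def combine_eqbox_loop (c : Int) : Nat → List (Int × Int × Int × Int) → Nat →
    List (Int × Int × Int × Int)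
  | 0, l, _ => l
  | n + 1, l, i =>
    if h : i + 1 < l.length then
      if (l[i+1]'h).2.1 - (l[i]'(by omega)).2.2.2 < c ∧ |(l[i+1]'h).1 - (l[i]'(by omega)).1| < 1 then
        match get_bounding_box (PySem.List.slice l (some (i : Int)) (some ((i : Int) + 2))) with
        | some b => combine_eqbox_loop c n (l.take i ++ b :: l.drop (i+2)) i
        | none => l   -- unreachable: the slice l[i:i+2] is nonempty here
      else combine_eqbox_loop c n l (i+1)
    else l

def combine_eqbox (bbox : List (Int × Int × Int × Int)) (critic_ydis : Int) :
    List (Int × Int × Int × Int) :=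
  combine_eqbox_loop critic_ydis bbox.length bbox 0

-- ===== PORT B =====
def combine_eqbox_alt (bbox : List (Int × Int × Int × Int)) (critic_ydis : Int) :
    List (Int × Int × Int × Int) :=
  match bbox with
  | [] => bbox
  | x :: xs =>
    let s := xs.foldl
      (fun (s : List (Int × Int × Int × Int) × (Int × Int × Int × Int)) nxt =>
        if nxt.2.1 - s.2.2.2.2 < critic_ydis ∧ |nxt.1 - s.2.1| < 1 then
          (s.1, (min s.2.1 nxt.1, min s.2.2.1 nxt.2.1, max s.2.2.2.1 nxt.2.2.1, max s.2.2.2.2 nxt.2.2.2))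
        else (s.1 ++ [s.2], nxt))
      ([], x)
    s.1 ++ [s.2]

-- ===== PRECONDITION & SPEC =====
def Spec_combine_eqbox (bbox : List (Int × Int × Int × Int)) (critic_ydis : Int) (out : List (Int × Int × Int × Int)) : Prop := out = combine_eqbox_alt bbox critic_ydis
instance (bbox : List (Int × Int × Int × Int)) (critic_ydis : Int) (out : List (Int × Int × Int × Int)) : Decidable (Spec_combine_eqbox bbox critic_ydis out) := by unfold Spec_combine_eqbox; infer_instance

-- ===== CLAIM (what is proved, stated in full; the proofs are below) =====
def Claim_equal_combine_eqbox : Prop := ∀ (bbox : List (Int × Int × Int × Int)) (critic_ydis : Int), Dom_combine_eqbox bbox critic_ydis → Spec_combine_eqbox bbox critic_ydis (combine_eqbox bbox critic_ydis)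

-- ===== LEMMAS AND PROOFS =====

-- recursive description of the single pass, used as the bridge between the two ports
def goMerge (c : Int) (cur : Int × Int × Int × Int) (rest : List (Int × Int × Int × Int)) :
    List (Int × Int × Int × Int) :=
  match rest with
  | [] => [cur]
  | y :: ys =>
    if y.2.1 - cur.2.2.2 < c ∧ |y.1 - cur.1| < 1 then
      goMerge c (min cur.1 y.1, min cur.2.1 y.2.1, max cur.2.2.1 y.2.2.1, max cur.2.2.2 y.2.2.2) ys
    else cur :: goMerge c y ys

lemma foldl_goMerge (c : Int) (xs : List (Int × Int × Int × Int))
    (cur : Int × Int × Int × Int) (out : List (Int × Int × Int × Int)) :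
    (xs.foldl
      (fun (s : List (Int × Int × Int × Int) × (Int × Int × Int × Int)) nxt =>
        if nxt.2.1 - s.2.2.2.2 < c ∧ |nxt.1 - s.2.1| < 1 then
          (s.1, (min s.2.1 nxt.1, min s.2.2.1 nxt.2.1, max s.2.2.2.1 nxt.2.2.1, max s.2.2.2.2 nxt.2.2.2))
        else (s.1 ++ [s.2], nxt))
      (out, cur)).1 ++
      [(xs.foldl
      (fun (s : List (Int × Int × Int × Int) × (Int × Int × Int × Int)) nxt =>
        if nxt.2.1 - s.2.2.2.2 < c ∧ |nxt.1 - s.2.1| < 1 then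
          (s.1, (min s.2.1 nxt.1, min s.2.2.1 nxt.2.1, max s.2.2.2.1 nxt.2.2.1, max s.2.2.2.2 nxt.2.2.2))
        else (s.1 ++ [s.2], nxt))
      (out, cur)).2] = out ++ goMerge c cur xs := by
  induction xs generalizing cur out with
  | nil => simp [goMerge]
  | cons y ys ih =>
    simp only [List.foldl_cons, goMerge]
    by_cases h : y.2.1 - cur.2.2.2 < c ∧ |y.1 - cur.1| < 1
    · rw [if_pos h, if_pos h]
      exact ih _ _
    · rw [if_neg h, if_neg h]
      rw [ih]
      simp

lemma alt_eq_goMerge (c : Int) (x : Int × Int × Int × Int) (xs : List (Int × Int × Int × Int)) :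
    combine_eqbox_alt (x :: xs) c = goMerge c x xs := by
  simpa [combine_eqbox_alt] using foldl_goMerge c xs x []

lemma loop_eq_goMerge (c : Int) (rest : List (Int × Int × Int × Int))
    (cur : Int × Int × Int × Int) (acc : List (Int × Int × Int × Int)) (n : Nat)
    (hn : rest.length < n) :
    combine_eqbox_loop c n (acc ++ cur :: rest) acc.length = acc ++ goMerge c cur rest := by
  induction rest generalizing cur acc n with
  | nil =>
    match n, hn with
    | m + 1, _ =>
      rw [combine_eqbox_loop]
      simp [goMerge]
  | cons y ys ih =>
    match n, hn with
    | m + 1, hn =>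
      rw [combine_eqbox_loop]
      have hm : ys.length < m := by simpa using Nat.lt_of_succ_lt_succ hn
      have hlen : acc.length + 1 < (acc ++ cur :: y :: ys).length := by simp
      have hget0 : (acc ++ cur :: y :: ys)[acc.length]'(by omega) = cur := by
        simp
      have hget1 : (acc ++ cur :: y :: ys)[acc.length + 1]'hlen = y := by
        rw [List.getElem_append_right (by omega)]
        simp
      rw [dif_pos hlen]
      rw [hget0, hget1]
      by_cases h : y.2.1 - cur.2.2.2 < c ∧ |y.1 - cur.1| < 1
      · rw [if_pos h]
        have hslice : PySem.List.slice (acc ++ cur :: y :: ys) (some (acc.length : Int))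
            (some ((acc.length : Int) + 2)) = [cur, y] := by
          have := PySem.List.slice_natCast_add (acc ++ cur :: y :: ys) acc.length 2
          rw [show ((acc.length : Int) + (2 : Nat)) = ((acc.length : Int) + 2) by push_cast; ring] at this
          rw [this]
          rw [show acc ++ cur :: y :: ys = acc ++ (cur :: y :: ys) from rfl, List.drop_left]
          rfl
        rw [hslice]
        simp only [get_bounding_box, List.map, List.foldl]
        have hmod : (acc ++ cur :: y :: ys).take acc.length ++
            (min cur.1 y.1, min cur.2.1 y.2.1, max cur.2.2.1 y.2.2.1, max cur.2.2.2 y.2.2.2) ::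
            (acc ++ cur :: y :: ys).drop (acc.length + 2) =
            acc ++ (min cur.1 y.1, min cur.2.1 y.2.1, max cur.2.2.1 y.2.2.1, max cur.2.2.2 y.2.2.2) :: ys := by
          rw [show acc ++ cur :: y :: ys = (acc ++ [cur, y]) ++ ys by simp,
              show acc.length + 2 = (acc ++ [cur, y]).length by simp, List.drop_left,
              show ((acc ++ [cur, y]) ++ ys).take acc.length = acc by
                rw [List.take_append_of_le_length (by simp), List.take_append_of_le_length (by simp),
                    List.take_length]]
        rw [hmod, ih _ acc m hm]
        conv_rhs => rw [goMerge]
        rw [if_pos h]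
      · rw [if_neg h]
        have : acc ++ cur :: y :: ys = (acc ++ [cur]) ++ y :: ys := by simp
        rw [this, show acc.length + 1 = (acc ++ [cur]).length by simp, ih y (acc ++ [cur]) m hm]
        conv_rhs => rw [goMerge]
        rw [if_neg h]
        simp

-- ===== VERDICT (by name: the statement is the Claim_ definition above) =====
theorem combine_eqbox_spec : Claim_equal_combine_eqbox := by
  intro bbox c _
  unfold Spec_combine_eqbox combine_eqbox
  match bbox with
  | [] => simp [combine_eqbox_loop, combine_eqbox_alt]
  | x :: xs =>
    rw [alt_eq_goMerge]
    simpa using loop_eq_goMerge c xs x [] (x :: xs).length (by simp)
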